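-- pv_equiv track=rewrite | github.com/niravpatidar37/AI-Task-Architect | llm_agent/app/services/ai_service.py | reorder_nodes_for_triggers
-- ===== SOURCE A (Python) =====
-- from typing import Any, Dict, List, Set
--
-- def reorder_nodes_for_triggers(nodes: List[Dict[str, Any]]) -> List[Dict[str, Any]]:
--     """Ensure trigger nodes appear first in the workflow sequence."""
--     triggers = [
--         n
--         for n in nodes
--         if any(x in n.get("type", "").lower() for x in ["cron", "webhook", "schedule", "trigger"])
--     ]
--     others = [n for n in nodes if n not in triggers]
--     return triggers + others
-- ===== SOURCE B (Python) =====
-- from typing import Any, Dict, List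
--
-- _TRIGGER_KEYWORDS = ("cron", "webhook", "schedule", "trigger")
--
-- def reorder_nodes_for_triggers(nodes: List[Dict[str, Any]]) -> List[Dict[str, Any]]:
--     """Ensure trigger nodes appear first in the workflow sequence (single-pass partition)."""
--     triggers: List[Dict[str, Any]] = []
--     others: List[Dict[str, Any]] = []
--     for n in nodes:
--         t = n.get("type", "").lower()
--         if any(k in t for k in _TRIGGER_KEYWORDS):
--             triggers.append(n)
--         else:
--             others.append(n)
--     return triggers + others
-- ===== Notes on version B (the rewrite author's own statement) =====
-- stated objective: alternative
-- what changed: Replaced the two list comprehensions (the second of which rescans the triggers list with dict equality for every node) by one single-pass partition that classifies each node by its own trigger condition; this is exact because two ==-equal dicts have the same 'type' value, so a node equal to some trigger is itself a trigger.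
import Mathlib
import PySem

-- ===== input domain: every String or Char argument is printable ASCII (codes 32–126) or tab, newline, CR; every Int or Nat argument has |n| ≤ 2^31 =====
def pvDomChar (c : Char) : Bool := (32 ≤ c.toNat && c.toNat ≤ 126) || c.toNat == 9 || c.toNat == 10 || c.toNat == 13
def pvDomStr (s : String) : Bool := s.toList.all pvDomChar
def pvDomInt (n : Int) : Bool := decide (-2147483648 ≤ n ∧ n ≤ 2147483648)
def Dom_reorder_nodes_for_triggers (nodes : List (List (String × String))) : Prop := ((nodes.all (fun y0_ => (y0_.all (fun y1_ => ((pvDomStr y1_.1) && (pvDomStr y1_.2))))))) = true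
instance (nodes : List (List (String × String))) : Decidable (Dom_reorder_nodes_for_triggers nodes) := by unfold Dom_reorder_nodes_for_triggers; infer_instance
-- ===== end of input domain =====

-- B replaces A's second comprehension (which rescans the triggers list with dict equality for
-- every node) by a single pass classifying each node by its own trigger condition;
-- objective: alternative (a different, single-traversal algorithm with the same observed cost).

-- ===== PORT A =====
-- shared helper: the trigger condition `any(x in n.get("type","").lower() for x in [...])`
def pvIsTrigger (n : List (String × String)) : Bool :=
  ["cron", "webhook", "schedule", "trigger"].any
    (fun x => PySem.Str.isIn x (PySem.Str.lower ((PySem.Dict.mk n).getD "type" "")))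

-- Python dict `==` between two nodes (same keys, same value per key); exact on Pre_ (nodup keys)
def pvDictEq (a b : List (String × String)) : Bool :=
  (a.all (fun p => (PySem.Dict.mk b).get? p.1 == some p.2)) &&
  (b.all (fun p => (PySem.Dict.mk a).get? p.1 == some p.2))

def reorder_nodes_for_triggers (nodes : List (List (String × String))) : List (List (String × String)) :=
  let triggers := nodes.filter (fun n => pvIsTrigger n)
  let others := nodes.filter (fun n => !(triggers.any (fun t => pvDictEq n t)))
  triggers ++ others

-- ===== PORT B =====
def reorder_nodes_for_triggers_alt (nodes : List (List (String × String))) : List (List (String × String)) :=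
  let acc := nodes.foldl
    (fun (acc : List (List (String × String)) × List (List (String × String))) n =>
      if pvIsTrigger n then (acc.1 ++ [n], acc.2) else (acc.1, acc.2 ++ [n]))
    ([], [])
  acc.1 ++ acc.2

-- ===== PRECONDITION & SPEC =====
-- Pre_ excludes association lists whose inner lists repeat a key: those do not represent any
-- Python dict (every Python input to A is a dict with unique keys), so nothing is claimed there.
def Pre_reorder_nodes_for_triggers (nodes : List (List (String × String))) : Prop :=
  ∀ n ∈ nodes, (n.map Prod.fst).Nodup
instance (nodes : List (List (String × String))) : Decidable (Pre_reorder_nodes_for_triggers nodes) := by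
  unfold Pre_reorder_nodes_for_triggers; infer_instance

def pvWitness_reorder_nodes_for_triggers : (List (List (String × String))) :=
  [[("type", "set"), ("id", "1")], [("type", "Webhook Trigger")], [("id", "2")]]

def Spec_reorder_nodes_for_triggers (nodes : List (List (String × String))) (out : List (List (String × String))) : Prop := out = reorder_nodes_for_triggers_alt nodes
instance (nodes : List (List (String × String))) (out : List (List (String × String))) : Decidable (Spec_reorder_nodes_for_triggers nodes out) := by unfold Spec_reorder_nodes_for_triggers; infer_instance

-- ===== CLAIM (what is proved, stated in full; the proofs are below) =====
def Claim_equal_reorder_nodes_for_triggers : Prop := ∀ (nodes : List (List (String × String))), Dom_reorder_nodes_for_triggers nodes → Pre_reorder_nodes_for_triggers nodes → Spec_reorder_nodes_for_triggers nodes (reorder_nodes_for_triggers nodes)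

-- ===== LEMMAS AND PROOFS =====

-- a member of an assoc list with nodup keys is found by Dict.get?
theorem pv_get?_of_mem {a : List (String × String)} (h : (a.map Prod.fst).Nodup)
    {k v : String} (hm : (k, v) ∈ a) : (PySem.Dict.mk a).get? k = some v := by
  induction a with
  | nil => cases hm
  | cons p rest ih =>
      obtain ⟨k', v'⟩ := p
      simp only [List.map_cons, List.nodup_cons] at h
      rw [PySem.Dict.get?_mk_cons]
      rcases List.mem_cons.mp hm with hh | ht
      · cases hh; simp
      · have hne : k' ≠ k := by
          intro he; exact h.1 (he ▸ (List.mem_map.mpr ⟨(k, v), ht, rfl⟩))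
        simp only [beq_iff_eq, if_neg hne]
        exact ih h.2 ht
  
-- Dict.get? success exhibits a member
theorem pv_mem_of_get? {a : List (String × String)} {k v : String}
    (h : (PySem.Dict.mk a).get? k = some v) : (k, v) ∈ a := by
  simp only [PySem.Dict.get?, Option.map_eq_some_iff] at h
  obtain ⟨p, hp, hv⟩ := h
  have hmem := List.mem_of_find?_eq_some hp
  have hk := List.find?_some hp
  simp only [beq_iff_eq] at hk
  obtain ⟨pk, pv⟩ := p
  simp only at hk hv
  subst hk; subst hv
  exact hmem

-- ==-equal dicts answer every lookup alike
theorem pv_get?_congr {a b : List (String × String)} (h : pvDictEq a b = true)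
    (k : String) : (PySem.Dict.mk a).get? k = (PySem.Dict.mk b).get? k := by
  simp only [pvDictEq, Bool.and_eq_true, List.all_eq_true, beq_iff_eq] at h
  cases ha : (PySem.Dict.mk a).get? k with
  | some v => exact (h.1 _ (pv_mem_of_get? ha)).symm
  | none =>
      cases hb : (PySem.Dict.mk b).get? k with
      | none => rfl
      | some v =>
          have := h.2 _ (pv_mem_of_get? hb)
          rw [ha] at this; cases this

-- hence the trigger condition is invariant under dict equality
theorem pv_isTrigger_congr {a b : List (String × String)} (h : pvDictEq a b = true) :
    pvIsTrigger a = pvIsTrigger b := by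
  simp only [pvIsTrigger, PySem.Dict.getD, pv_get?_congr h]

-- with nodup keys, dict equality is reflexive
theorem pv_dictEq_refl {a : List (String × String)} (h : (a.map Prod.fst).Nodup) :
    pvDictEq a a = true := by
  simp only [pvDictEq, Bool.and_eq_true, List.all_eq_true, beq_iff_eq]
  exact ⟨fun p hp => pv_get?_of_mem h hp, fun p hp => pv_get?_of_mem h hp⟩

-- B's fold is the pair of filters
theorem pv_fold_partition (l : List (List (String × String)))
    (t o : List (List (String × String))) :
    l.foldl
      (fun (acc : List (List (String × String)) × List (List (String × String))) n =>
        if pvIsTrigger n then (acc.1 ++ [n], acc.2) else (acc.1, acc.2 ++ [n]))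
      (t, o)
    = (t ++ l.filter (fun n => pvIsTrigger n), o ++ l.filter (fun n => !pvIsTrigger n)) := by
  induction l generalizing t o with
  | nil => simp
  | cons n rest ih =>
      by_cases hn : pvIsTrigger n = true
      · simp [List.foldl_cons, hn, ih]
      · simp [List.foldl_cons, hn, ih]

-- ===== VERDICT (by name: the statement is the Claim_ definition above) =====
theorem reorder_nodes_for_triggers_spec : Claim_equal_reorder_nodes_for_triggers := by
  intro nodes _ hpre
  unfold Spec_reorder_nodes_for_triggers reorder_nodes_for_triggers reorder_nodes_for_triggers_alt
  rw [pv_fold_partition]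
  simp only [List.nil_append]
  congr 1
  apply List.filter_congr
  intro n hn
  congr 1
  by_cases hp : pvIsTrigger n = true
  · rw [hp]
    rw [List.any_eq_true]
    exact ⟨n, List.mem_filter.mpr ⟨hn, hp⟩, pv_dictEq_refl (hpre n hn)⟩
  · rw [Bool.eq_false_iff.mpr hp]
    rw [List.any_eq_false]
    intro t ht hEq
    exact hp ((pv_isTrigger_congr hEq).trans (List.mem_filter.mp ht).2)
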